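-- pv_equiv track=rewrite | github.com/figure-2/Algorithm | programmers/코테_입문/84percent/잘라서배열로저장.py | solution
-- ===== SOURCE A (Python) =====
-- def solution(my_str, n):
--     answer = []
--
--     while len(my_str):
--         if len(my_str) >= n:
--             temp = my_str[0:n]
--             my_str = my_str.replace(temp,'',1)
--             answer.append(temp)
--         else:
--             temp = my_str
--             my_str = my_str.replace(temp,'')
--             answer.append(temp)
--
--     return answer
-- ===== SOURCE B (Python) =====
-- def solution(my_str, n):
--     # Single left-to-right pass accumulating a buffer instead of repeatedly slicing and shrinking the string.
--     answer = []
--     cur = ''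
--     for ch in my_str:
--         cur += ch
--         if len(cur) == n:
--             answer.append(cur)
--             cur = ''
--     if cur:
--         answer.append(cur)
--     return answer
-- ===== Notes on version B (the rewrite author's own statement) =====
-- stated objective: alternative
-- what changed: Replaces A's while-loop that re-slices the shrinking string and deletes the matched prefix via str.replace each round with a single left-to-right character pass that accumulates a buffer and emits it whenever it reaches length n.
import Mathlib
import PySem

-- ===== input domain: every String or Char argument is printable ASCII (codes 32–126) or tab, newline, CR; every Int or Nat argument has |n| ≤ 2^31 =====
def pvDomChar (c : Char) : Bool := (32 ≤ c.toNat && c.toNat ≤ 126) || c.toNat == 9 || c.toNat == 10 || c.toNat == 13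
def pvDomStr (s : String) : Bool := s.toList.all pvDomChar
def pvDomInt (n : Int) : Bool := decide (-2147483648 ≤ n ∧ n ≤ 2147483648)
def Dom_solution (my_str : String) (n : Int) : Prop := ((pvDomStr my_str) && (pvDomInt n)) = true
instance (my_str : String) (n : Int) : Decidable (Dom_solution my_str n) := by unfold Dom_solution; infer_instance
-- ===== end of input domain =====

-- B replaces A's repeated slice-and-str.replace deletion loop with one buffered character pass (a different single-pass accumulation); equivalence proved for n >= 1 or empty input (A loops forever otherwise).


-- ===== PORT A =====
-- my_str.replace(temp, '', 1): remove the FIRST occurrence of temp (exact hand port of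
-- str.replace with count=1 and empty replacement: find first occurrence, cut it out;
-- for temp = '' Python inserts '' before the first char, i.e. returns s unchanged — matched).
def pyReplace1 (s old : List Char) : List Char :=
  let i := PySem.Chars.find s old
  if i = -1 then s else s.take i.toNat ++ s.drop (i.toNat + old.length)

-- the while-loop of A; fuel = initial length + 1 only makes the loop total (A itself
-- diverges when n ≤ 0 and the string is non-empty; such inputs are outside Pre_)
def solutionLoop (n : Int) : Nat → List Char → List String → List String
  | 0, _, answer => answer
  | fuel+1, s, answer =>
    if (s.length : Int) ≠ 0 then
      if (s.length : Int) ≥ n then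
        solutionLoop n fuel (pyReplace1 s (PySem.Chars.slice s (some 0) (some n)))
          (answer ++ [String.ofList (PySem.Chars.slice s (some 0) (some n))])
      else
        solutionLoop n fuel (PySem.Chars.replace s s [])
          (answer ++ [String.ofList s])
    else answer

def solution (my_str : String) (n : Int) : List String :=
  solutionLoop n (my_str.toList.length + 1) my_str.toList []

-- ===== PORT B =====
def solution_alt (my_str : String) (n : Int) : List String :=
  let p := my_str.toList.foldl
    (fun (acc : List String × List Char) c =>
      let cur := acc.2 ++ [c]
      if (cur.length : Int) = n then (acc.1 ++ [String.ofList cur], ([] : List Char))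
      else (acc.1, cur))
    (([] : List String), ([] : List Char))
  if p.2 ≠ [] then p.1 ++ [String.ofList p.2] else p.1

-- ===== PRECONDITION & SPEC =====
-- A's while-loop never terminates when n ≤ 0 and my_str is non-empty (str.replace('','' ,1)
-- removes nothing), so exactly those inputs are excluded; A returns on all admitted inputs.
def Pre_solution (my_str : String) (n : Int) : Prop := 1 ≤ n ∨ my_str = ""
instance (my_str : String) (n : Int) : Decidable (Pre_solution my_str n) := by unfold Pre_solution; infer_instance
def pvWitness_solution : String × Int := ("hello world", 3)

def Spec_solution (my_str : String) (n : Int) (out : List String) : Prop := out = solution_alt my_str n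
instance (my_str : String) (n : Int) (out : List String) : Decidable (Spec_solution my_str n out) := by unfold Spec_solution; infer_instance

-- ===== CLAIM (what is proved, stated in full; the proofs are below) =====
def Claim_equal_solution : Prop := ∀ (my_str : String) (n : Int), Dom_solution my_str n → Pre_solution my_str n → Spec_solution my_str n (solution my_str n)

-- ===== LEMMAS AND PROOFS =====

-- the common value: the chunk list, chunk size m+1
def chunks (m : Nat) (s : List Char) : List String :=
  if h : s = [] then [] else String.ofList (s.take (m+1)) :: chunks m (s.drop (m+1))
termination_by s.length
decreasing_by
  cases s with
  | nil => exact absurd rfl h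
  | cons c t => simp

theorem find_prefix_zero (s old : List Char) (h : old <+: s) : PySem.Chars.find s old = 0 := by
  have hinf : old <:+: s := h.isInfix
  have h0 : 0 ≤ PySem.Chars.find s old := (PySem.Chars.find_nonneg_iff s old).mpr hinf
  have hspec := PySem.Chars.find_spec h0
  by_contra hne
  have hpos : 0 < (PySem.Chars.find s old).toNat := by omega
  exact hspec.2 0 hpos (by simpa using h)

theorem pyReplace1_take (s : List Char) (k : Nat) (hk : k ≤ s.length) :
    pyReplace1 s (s.take k) = s.drop k := by
  have hf : PySem.Chars.find s (s.take k) = 0 := find_prefix_zero s _ (List.take_prefix k s)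
  simp [pyReplace1, hf, List.length_take, Nat.min_eq_left hk]

theorem replace_self_nil (s : List Char) : PySem.Chars.replace s s [] = [] := by
  cases s with
  | nil => simp [PySem.Chars.replace]
  | cons c t =>
    rw [PySem.Chars.replace]
    simp only [List.isEmpty_cons, List.length_cons]
    rw [PySem.Chars.replace.go]
    simp [List.isPrefixOf_iff_prefix]
    cases t.length <;> simp [PySem.Chars.replace.go]

theorem slice_zero_n (s : List Char) (n : Int) (hn : 0 ≤ n) :
    PySem.Chars.slice s (some 0) (some n) = s.take n.toNat := by
  rw [PySem.Chars.slice_eq_listSlice, PySem.List.slice_zero_start, PySem.List.slice_to s hn]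

theorem solutionLoop_eq (m : Nat) : ∀ (fuel : Nat) (s : List Char) (ans : List String),
    s.length ≤ fuel →
    solutionLoop ((m : Int) + 1) fuel s ans = ans ++ chunks m s := by
  intro fuel
  induction fuel with
  | zero =>
    intro s ans h
    have : s = [] := List.eq_nil_of_length_eq_zero (by omega)
    subst this; simp [solutionLoop, chunks]
  | succ f ih =>
    intro s ans h
    cases s with
    | nil => simp [solutionLoop, chunks]
    | cons c t =>
      rw [solutionLoop]
      rw [if_pos (by simp only [List.length_cons]; push_cast; omega : ¬((c :: t).length : Int) = 0)]
      by_cases hge : ((c :: t).length : Int) ≥ (m : Int) + 1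
      · rw [if_pos hge]
        have hm1 : m + 1 ≤ (c :: t).length := by exact_mod_cast hge
        have hsl : PySem.Chars.slice (c :: t) (some 0) (some ((m : Int) + 1))
            = (c :: t).take (m+1) := by
          rw [slice_zero_n _ _ (by omega),
              show ((m : Int) + 1).toNat = m + 1 by omega]
        rw [hsl, pyReplace1_take _ _ hm1,
            ih ((c :: t).drop (m+1)) _ (by simp only [List.length_drop, List.length_cons] at h ⊢; omega)]
        conv_rhs => rw [chunks, dif_neg (by simp : ¬(c :: t) = [])]
        simp
      · rw [if_neg hge]
        have hlt : (c :: t).length < m + 1 := by exact_mod_cast not_le.mp hge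
        rw [replace_self_nil, ih [] _ (by simp)]
        conv_rhs => rw [chunks, dif_neg (by simp : ¬(c :: t) = [])]
        rw [List.take_of_length_le (by omega : (c :: t).length ≤ m + 1),
            List.drop_eq_nil_of_le (by omega : (c :: t).length ≤ m + 1)]
        simp [chunks]

theorem fold_eq (m : Nat) : ∀ (s : List Char) (ans : List String) (cur : List Char),
    cur.length < m + 1 →
    (let p := s.foldl
        (fun (acc : List String × List Char) c =>
          let cur := acc.2 ++ [c]
          if (cur.length : Int) = (m : Int) + 1 then (acc.1 ++ [String.ofList cur], ([] : List Char))
          else (acc.1, cur))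
        (ans, cur)
     if p.2 ≠ [] then p.1 ++ [String.ofList p.2] else p.1) = ans ++ chunks m (cur ++ s) := by
  intro s
  induction s with
  | nil =>
    intro ans cur hc
    by_cases h : cur = []
    · subst h; simp [chunks]
    · simp only [List.foldl_nil, List.append_nil]
      rw [if_pos h, chunks, dif_neg h,
          List.take_of_length_le (by omega : cur.length ≤ m + 1),
          chunks, dif_pos (List.drop_eq_nil_of_le (by omega : cur.length ≤ m + 1))]
  | cons c t ih =>
    intro ans cur hc
    simp only [List.foldl_cons]
    by_cases hfull : (((cur ++ [c]).length : Int)) = (m : Int) + 1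
    · have hl : (cur ++ [c]).length = m + 1 := by exact_mod_cast hfull
      rw [if_pos hfull, ih (ans ++ [String.ofList (cur ++ [c])]) [] (by simp)]
      have hsplit : cur ++ c :: t = (cur ++ [c]) ++ t := by simp
      rw [hsplit]
      conv_rhs => rw [chunks, dif_neg (by simp : ¬(cur ++ [c]) ++ t = [])]
      rw [List.take_append_of_le_length (le_of_eq hl.symm),
          List.take_of_length_le (le_of_eq hl),
          List.drop_append_of_le_length (le_of_eq hl.symm),
          List.drop_eq_nil_of_le (le_of_eq hl)]
      simp
    · have hle : (cur ++ [c]).length ≤ m + 1 := by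
        simp only [List.length_append, List.length_cons, List.length_nil]; omega
      have hl : (cur ++ [c]).length < m + 1 := by
        rcases lt_or_eq_of_le hle with h | h
        · exact h
        · exact absurd (by exact_mod_cast h) hfull
      rw [if_neg hfull, ih ans (cur ++ [c]) hl]
      simp

theorem solution_empty (n : Int) : solution "" n = [] := by
  simp [solution, solutionLoop]

theorem solution_alt_empty (n : Int) : solution_alt "" n = [] := by
  simp [solution_alt]

-- ===== VERDICT (by name: the statement is the Claim_ definition above) =====
theorem solution_spec : Claim_equal_solution := by
  intro my_str n _ hpre
  unfold Spec_solution
  rcases hpre with hn | hempty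
  · obtain ⟨m, rfl⟩ : ∃ m : Nat, n = (m : Int) + 1 :=
      ⟨(n - 1).toNat, by omega⟩
    rw [solution, solutionLoop_eq m _ _ [] (by omega)]
    have hb := fold_eq m my_str.toList [] [] (by simp)
    simp only [List.nil_append] at hb ⊢
    rw [solution_alt]
    exact hb.symm
  · subst hempty
    rw [solution_empty, solution_alt_empty]
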